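-- pv_equiv track=rewrite | github.com/JPercyRUSENY/Test | exemple.py | compterSequence
-- ===== SOURCE A (Python) =====
-- def compterSequence(tab):
--     cpt = 0
--     i = 0
--     while i<len(tab)-2:
--         if tab[i]=="O" and tab[i+1]=="X" and tab[i+2]=="O":
--             cpt+=1
--             i+=3
--         else:
--             i+=1
--     return cpt
-- ===== SOURCE B (Python) =====
-- def compterSequence(tab):
--     positions = [p for p in range(len(tab) - 2)
--                  if tab[p] == "O" and tab[p+1] == "X" and tab[p+2] == "O"]
--     cpt = 0
--     last = -3
--     for p in positions:
--         if p >= last + 3: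
--             cpt += 1
--             last = p
--     return cpt
-- ===== Notes on version B (the rewrite author's own statement) =====
-- stated objective: alternative
-- what changed: Replaces the single intertwined skip-3 while loop by two passes: a detection pass building the list of all OXO start indices, then a greedy non-overlap selection pass over that index list.
import Mathlib
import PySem

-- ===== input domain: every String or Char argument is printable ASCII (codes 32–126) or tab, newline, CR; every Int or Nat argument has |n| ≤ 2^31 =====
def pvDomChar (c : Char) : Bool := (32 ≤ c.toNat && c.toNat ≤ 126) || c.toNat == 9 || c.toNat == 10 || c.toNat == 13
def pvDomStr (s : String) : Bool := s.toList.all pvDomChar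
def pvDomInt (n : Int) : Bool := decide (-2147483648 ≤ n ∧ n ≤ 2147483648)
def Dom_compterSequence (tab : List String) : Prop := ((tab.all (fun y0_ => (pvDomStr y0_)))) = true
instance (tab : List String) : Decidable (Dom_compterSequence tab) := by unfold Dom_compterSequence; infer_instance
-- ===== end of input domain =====

-- B replaces A's single skip-3 while loop by a detection pass building the list of
-- OXO start positions followed by a greedy non-overlap selection pass (alternative
-- decomposition, same O(n) cost).


-- ===== PORT A =====
-- the while loop: i advances by 3 on a match, by 1 otherwise; cpt counts matches.
-- tab[i], tab[i+1], tab[i+2] are always in range when the guard holds, so getD is exact.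
def compterSequenceLoop (tab : List String) (i : Nat) (cpt : Int) : Int :=
  if h : (i : Int) < (tab.length : Int) - 2 then
    if tab.getD i "" == "O" && tab.getD (i+1) "" == "X" && tab.getD (i+2) "" == "O" then
      compterSequenceLoop tab (i+3) (cpt+1)
    else
      compterSequenceLoop tab (i+1) cpt
  else cpt
termination_by tab.length - i
decreasing_by all_goals omega

def compterSequence (tab : List String) : Int :=
  compterSequenceLoop tab 0 0

-- ===== PORT B =====
-- pass 1: all candidate start indices; pass 2: greedy selection with last = -3.
def compterSequence_alt (tab : List String) : Int :=
  let positions := (List.range (tab.length - 2)).filter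
    (fun p => tab.getD p "" == "O" && tab.getD (p+1) "" == "X" && tab.getD (p+2) "" == "O")
  let s := positions.foldl
    (fun (s : Int × Int) (p : Nat) => if (p : Int) ≥ s.1 + 3 then ((p : Int), s.2 + 1) else s)
    (-3, 0)
  s.2

-- ===== PRECONDITION & SPEC =====
def Spec_compterSequence (tab : List String) (out : Int) : Prop := out = compterSequence_alt tab
instance (tab : List String) (out : Int) : Decidable (Spec_compterSequence tab out) := by unfold Spec_compterSequence; infer_instance

-- ===== CLAIM (what is proved, stated in full; the proofs are below) =====
def Claim_equal_compterSequence : Prop := ∀ (tab : List String), Dom_compterSequence tab → Spec_compterSequence tab (compterSequence tab)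

-- ===== LEMMAS AND PROOFS =====

def pvPred (tab : List String) (p : Nat) : Bool :=
  tab.getD p "" == "O" && tab.getD (p+1) "" == "X" && tab.getD (p+2) "" == "O"

-- positions with index ≥ i
def pvPos (tab : List String) (i : Nat) : List Nat :=
  (List.range' i (tab.length - 2 - i)).filter (pvPred tab)

def pvStep (s : Int × Int) (p : Nat) : Int × Int :=
  if (p : Int) ≥ s.1 + 3 then ((p : Int), s.2 + 1) else s

theorem pvPos_stop (tab : List String) (i : Nat) (h : tab.length - 2 ≤ i) :
    pvPos tab i = [] := by
  simp [pvPos, Nat.sub_eq_zero_of_le h]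

theorem pvPos_cons (tab : List String) (i : Nat) (h : i < tab.length - 2) :
    pvPos tab i = (if pvPred tab i then [i] else []) ++ pvPos tab (i+1) := by
  have hn : tab.length - 2 - i = (tab.length - 2 - (i+1)) + 1 := by omega
  rw [pvPos, hn, List.range'_succ, List.filter_cons]
  by_cases hp : pvPred tab i <;> simp [hp, pvPos]

-- positions strictly between a chosen index i and i+3 are skipped by the greedy fold
theorem pvSkip (tab : List String) (i : Nat) (cpt : Int) :
    ∀ d j, j + d = i + 3 → i < j →
      List.foldl pvStep ((i : Int), cpt) (pvPos tab j)
        = List.foldl pvStep ((i : Int), cpt) (pvPos tab (i+3)) := by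
  intro d
  induction d with
  | zero =>
    intro j hj _
    obtain rfl : j = i + 3 := by omega
    rfl
  | succ d ih =>
    intro j hj hij
    by_cases hb : j < tab.length - 2
    · rw [pvPos_cons tab j hb]
      have hskip : ¬ ((j : Int) ≥ (i : Int) + 3) := by omega
      by_cases hp : pvPred tab j
      · simp only [hp, if_true, List.cons_append, List.nil_append, List.foldl_cons]
        rw [show pvStep ((i : Int), cpt) j = ((i : Int), cpt) from by
          simp [pvStep, hskip]]
        exact ih (j+1) (by omega) (by omega)
      · simp only [hp]
        exact ih (j+1) (by omega) (by omega)
    · rw [pvPos_stop tab j (by omega), pvPos_stop tab (i+3) (by omega)]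

theorem loop_eq_fold (tab : List String) :
    ∀ n i, tab.length - 2 - i ≤ n → ∀ (last cpt : Int), last ≤ (i : Int) - 3 →
      compterSequenceLoop tab i cpt = (List.foldl pvStep (last, cpt) (pvPos tab i)).2 := by
  intro n
  induction n with
  | zero =>
    intro i hi last cpt _
    have hle : tab.length - 2 ≤ i := by omega
    rw [pvPos_stop tab i hle, compterSequenceLoop]
    have hng : ¬ ((i : Int) < (tab.length : Int) - 2) := by omega
    simp [hng]
  | succ n ih =>
    intro i hi last cpt hlast
    by_cases hb : i < tab.length - 2
    · have hg : (i : Int) < (tab.length : Int) - 2 := by omega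
      rw [compterSequenceLoop, dif_pos hg, pvPos_cons tab i hb]
      by_cases hp : pvPred tab i
      · have hp' : (tab.getD i "" == "O" && tab.getD (i+1) "" == "X" && tab.getD (i+2) "" == "O") = true := hp
        rw [if_pos hp']
        simp only [hp, if_true, List.cons_append, List.nil_append, List.foldl_cons]
        have htake : pvStep (last, cpt) i = ((i : Int), cpt + 1) := by
          simp only [pvStep]
          rw [if_pos (by omega)]
        rw [htake, pvSkip tab i (cpt+1) 2 (i+1) (by omega) (by omega)]
        exact ih (i+3) (by omega) (i : Int) (cpt+1) (by omega)
      · have hp' : ¬ ((tab.getD i "" == "O" && tab.getD (i+1) "" == "X" && tab.getD (i+2) "" == "O") = true) := hp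
        rw [if_neg hp']
        simp only [hp]
        exact ih (i+1) (by omega) last cpt (by omega)
    · have hle : tab.length - 2 ≤ i := by omega
      rw [pvPos_stop tab i hle, compterSequenceLoop]
      have hng : ¬ ((i : Int) < (tab.length : Int) - 2) := by omega
      simp [hng]

-- ===== VERDICT (by name: the statement is the Claim_ definition above) =====
theorem compterSequence_spec : Claim_equal_compterSequence := by
  intro tab _
  show compterSequence tab = compterSequence_alt tab
  have h :=
    loop_eq_fold tab (tab.length) 0 (by omega) (-3) 0 (by omega)
  have halt : compterSequence_alt tab = (List.foldl pvStep (-3, 0) (pvPos tab 0)).2 := by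
    unfold compterSequence_alt pvPos pvPred pvStep
    rw [List.range_eq_range']
    rfl
  rw [compterSequence, h, halt]
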